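-- pv_equiv track=rewrite | github.com/anton325/HandGestureRecognition | frameBuffer.py | rotate_label
-- ===== SOURCE A (Python) =====
-- def rotate_label(label, n):
--     for i in range(0,n):
--         if label == 0:
--             label = 0
--         elif label == 1:
--             label = 4
--         elif label == 2:
--             label = 3
--         elif label == 3:
--             label = 1
--         elif label == 4:
--             label = 2
--     return label
-- ===== SOURCE B (Python) =====
-- def rotate_label(label, n):
--     # One table lookup instead of n iterations: the labels 1,2,3,4 form a
--     # 4-cycle (1 -> 4 -> 2 -> 3 -> 1); 0 and anything else is fixed.
--     cycle = [1, 4, 2, 3]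
--     if n <= 0 or label not in cycle:
--         return label
--     return cycle[(cycle.index(label) + n) % 4]
-- ===== Notes on version B (the rewrite author's own statement) =====
-- stated objective: faster
-- what changed: Replaces the n-step loop by reducing n modulo the permutation's cycle length 4 and reading the answer from the cycle table in O(1).
import Mathlib
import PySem

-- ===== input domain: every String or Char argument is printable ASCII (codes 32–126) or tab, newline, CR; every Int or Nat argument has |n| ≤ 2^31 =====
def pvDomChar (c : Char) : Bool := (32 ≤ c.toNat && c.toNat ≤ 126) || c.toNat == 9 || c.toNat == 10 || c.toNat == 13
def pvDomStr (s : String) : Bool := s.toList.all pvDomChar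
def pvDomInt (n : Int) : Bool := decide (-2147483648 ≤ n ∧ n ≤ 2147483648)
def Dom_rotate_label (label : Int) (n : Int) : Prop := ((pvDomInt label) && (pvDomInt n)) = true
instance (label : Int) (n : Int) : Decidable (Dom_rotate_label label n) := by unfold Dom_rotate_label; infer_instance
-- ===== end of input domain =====

-- B replaces A's n-step loop by one table lookup after reducing n modulo the cycle length 4 (objective: faster).

-- ===== PORT A =====
def rotate_label (label : Int) (n : Int) : Int :=
  (PySem.List.pyRange 0 n 1).foldl (fun label _ =>
    if label = 0 then 0
    else if label = 1 then 4
    else if label = 2 then 3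
    else if label = 3 then 1
    else if label = 4 then 2
    else label) label

-- ===== PORT B =====
def rotate_label_alt (label : Int) (n : Int) : Int :=
  let cycle : List Int := [1, 4, 2, 3]
  if n ≤ 0 || !(cycle.contains label) then label
  else
    match PySem.List.index? cycle label with
    | none => label  -- unreachable: label ∈ cycle here (Python's .index cannot raise)
    | some i => (PySem.List.pyGet? cycle (PySem.Int.mod ((i : Int) + n) 4)).getD label

-- ===== PRECONDITION & SPEC =====
def Spec_rotate_label (label : Int) (n : Int) (out : Int) : Prop := out = rotate_label_alt label n
instance (label : Int) (n : Int) (out : Int) : Decidable (Spec_rotate_label label n out) := by unfold Spec_rotate_label; infer_instance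

-- ===== CLAIM (what is proved, stated in full; the proofs are below) =====
def Claim_equal_rotate_label : Prop := ∀ (label : Int) (n : Int), Dom_rotate_label label n → Spec_rotate_label label n (rotate_label label n)

-- ===== LEMMAS AND PROOFS =====

/-- The body of A's loop as a function. -/
def stepA (l : Int) : Int :=
  if l = 0 then 0
  else if l = 1 then 4
  else if l = 2 then 3
  else if l = 3 then 1
  else if l = 4 then 2
  else l

theorem foldl_const_iterate (f : Int → Int) (xs : List Int) (x : Int) :
    xs.foldl (fun l _ => f l) x = f^[xs.length] x := by
  induction xs generalizing x with
  | nil => simp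
  | cons a t ih => simp [List.foldl_cons, ih, Function.iterate_succ_apply]

theorem rotate_label_eq_iterate (label n : Int) :
    rotate_label label n = stepA^[n.toNat] label := by
  have h : rotate_label label n
      = (PySem.List.pyRange 0 n 1).foldl (fun l _ => stepA l) label := rfl
  rw [h, foldl_const_iterate, PySem.List.length_pyRange_one]
  norm_num

theorem iterate_mod_four (f : Int → Int) (l : Int) (h : f^[4] l = l) :
    ∀ k, f^[k] l = f^[k % 4] l := by
  intro k
  induction k using Nat.strong_induction_on with
  | _ k ih =>
    by_cases hk : k < 4
    · rw [Nat.mod_eq_of_lt hk]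
    · have h4 : 4 ≤ k := by omega
      calc f^[k] l = f^[(k - 4) + 4] l := by rw [show (k - 4) + 4 = k by omega]
        _ = f^[k - 4] l := by rw [Function.iterate_add_apply, h]
        _ = f^[(k - 4) % 4] l := ih (k - 4) (by omega)
        _ = f^[k % 4] l := by rw [Nat.mod_eq_sub_mod h4]

theorem stepA_fixed (label : Int) (h : label ≠ 1 ∧ label ≠ 2 ∧ label ≠ 3 ∧ label ≠ 4) :
    stepA label = label := by
  obtain ⟨h1, h2, h3, h4⟩ := h
  by_cases h0 : label = 0 <;> simp [stepA, h0, h1, h2, h3, h4]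

theorem mod4_toNat (m : Int) (hm : 0 ≤ m) :
    PySem.Int.mod m 4 = ((m.toNat % 4 : Nat) : Int) := by
  rw [PySem.Int.mod_eq_emod_of_pos (by norm_num)]
  omega

theorem rotate_cycle (label n : Int) (hn : 0 < n)
    (hmem : label = 1 ∨ label = 2 ∨ label = 3 ∨ label = 4) :
    rotate_label label n = rotate_label_alt label n := by
  rw [rotate_label_eq_iterate]
  have hper : stepA^[4] label = label := by
    rcases hmem with h | h | h | h <;> subst h <;> decide
  rw [iterate_mod_four stepA label hper]
  have hk : n.toNat % 4 = 0 ∨ n.toNat % 4 = 1 ∨ n.toNat % 4 = 2 ∨ n.toNat % 4 = 3 := by omega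
  rcases hmem with h | h | h | h <;> subst h
  · -- label = 1, cycle index 0
    have hB : rotate_label_alt 1 n
        = (PySem.List.pyGet? [1, 4, 2, 3] (PySem.Int.mod (((0 : Nat) : Int) + n) 4)).getD 1 := by
      simp [rotate_label_alt, not_le.mpr hn,
        show List.idxOf? (1:Int) [1, 4, 2, 3] = some 0 from by decide]
    rw [hB, mod4_toNat _ (by omega), show (((0:Nat):Int) + n).toNat = 0 + n.toNat by omega]
    rcases hk with h | h | h | h <;>
      rw [show (0 + n.toNat) % 4 = n.toNat % 4 by omega, h] <;> decide
  · -- label = 2, cycle index 2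
    have hB : rotate_label_alt 2 n
        = (PySem.List.pyGet? [1, 4, 2, 3] (PySem.Int.mod (((2 : Nat) : Int) + n) 4)).getD 2 := by
      simp [rotate_label_alt, not_le.mpr hn,
        show List.idxOf? (2:Int) [1, 4, 2, 3] = some 2 from by decide]
    rw [hB, mod4_toNat _ (by omega), show (((2:Nat):Int) + n).toNat = 2 + n.toNat by omega]
    rcases hk with h | h | h | h <;>
      [rw [show (2 + n.toNat) % 4 = 2 by omega, h];
       rw [show (2 + n.toNat) % 4 = 3 by omega, h];
       rw [show (2 + n.toNat) % 4 = 0 by omega, h];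
       rw [show (2 + n.toNat) % 4 = 1 by omega, h]] <;> decide
  · -- label = 3, cycle index 3
    have hB : rotate_label_alt 3 n
        = (PySem.List.pyGet? [1, 4, 2, 3] (PySem.Int.mod (((3 : Nat) : Int) + n) 4)).getD 3 := by
      simp [rotate_label_alt, not_le.mpr hn,
        show List.idxOf? (3:Int) [1, 4, 2, 3] = some 3 from by decide]
    rw [hB, mod4_toNat _ (by omega), show (((3:Nat):Int) + n).toNat = 3 + n.toNat by omega]
    rcases hk with h | h | h | h <;>
      [rw [show (3 + n.toNat) % 4 = 3 by omega, h];
       rw [show (3 + n.toNat) % 4 = 0 by omega, h];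
       rw [show (3 + n.toNat) % 4 = 1 by omega, h];
       rw [show (3 + n.toNat) % 4 = 2 by omega, h]] <;> decide
  · -- label = 4, cycle index 1
    have hB : rotate_label_alt 4 n
        = (PySem.List.pyGet? [1, 4, 2, 3] (PySem.Int.mod (((1 : Nat) : Int) + n) 4)).getD 4 := by
      simp [rotate_label_alt, not_le.mpr hn,
        show List.idxOf? (4:Int) [1, 4, 2, 3] = some 1 from by decide]
    rw [hB, mod4_toNat _ (by omega), show (((1:Nat):Int) + n).toNat = 1 + n.toNat by omega]
    rcases hk with h | h | h | h <;>
      [rw [show (1 + n.toNat) % 4 = 1 by omega, h];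
       rw [show (1 + n.toNat) % 4 = 2 by omega, h];
       rw [show (1 + n.toNat) % 4 = 3 by omega, h];
       rw [show (1 + n.toNat) % 4 = 0 by omega, h]] <;> decide

-- ===== VERDICT (by name: the statement is the Claim_ definition above) =====
theorem rotate_label_spec : Claim_equal_rotate_label := by
  intro label n _
  unfold Spec_rotate_label
  by_cases hn : n ≤ 0
  · have : PySem.List.pyRange 0 n 1 = [] := PySem.List.pyRange_one_eq_nil (by omega)
    simp [rotate_label, rotate_label_alt, this, hn]
  · push Not at hn
    by_cases hmem : label = 1 ∨ label = 2 ∨ label = 3 ∨ label = 4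
    · exact rotate_cycle label n hn hmem
    · push Not at hmem
      have hfix := stepA_fixed label hmem
      rw [rotate_label_eq_iterate, Function.iterate_fixed hfix]
      obtain ⟨h1, h2, h3, h4⟩ := hmem
      simp [rotate_label_alt, h1, h2, h3, h4]
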